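-- pv_equiv track=rewrite | github.com/ypypy28/yandex.contest | 2022_training_backend_automne_winter/B. Boarding/solution.py | free_from
-- ===== SOURCE A (Python) =====
-- from collections import namedtuple, deque
--
-- LeftSeats = namedtuple("LeftSeats", "A B C")
--
-- RightSeats = namedtuple("RightSeats", "F E D")
--
-- def free_from(position: str, seats: LeftSeats | RightSeats) -> int:
--     n = len(seats)
--     if position == "window":
--         i = count = 0
--         while i < n and seats[i] == '.':
--             count += 1
--             i += 1
--         return count
--
--     i = n-1
--     count = 0
--     while i > -1 and seats[i] == '.':
--         count += 1
--         i -= 1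
--     return count
-- ===== SOURCE B (Python) =====
-- def free_from(position, seats):
--     # Closed form: with flags taken from the chosen end, the run length of
--     # leading free seats over exactly three seats is f0*(1 + f1*(1 + f2)).
--     a, b, c = seats
--     if position != "window":
--         a, c = c, a
--     return (a == '.') * (1 + (b == '.') * (1 + (c == '.')))
-- ===== Notes on version B (the rewrite author's own statement) =====
-- stated objective: alternative
-- what changed: Replaces the index-and-counter while-loops with a loop-free closed-form Horner-style boolean-arithmetic formula f0*(1 + f1*(1 + f2)) over the three seat flags (fields swapped once for the aisle side).
import Mathlib
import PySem

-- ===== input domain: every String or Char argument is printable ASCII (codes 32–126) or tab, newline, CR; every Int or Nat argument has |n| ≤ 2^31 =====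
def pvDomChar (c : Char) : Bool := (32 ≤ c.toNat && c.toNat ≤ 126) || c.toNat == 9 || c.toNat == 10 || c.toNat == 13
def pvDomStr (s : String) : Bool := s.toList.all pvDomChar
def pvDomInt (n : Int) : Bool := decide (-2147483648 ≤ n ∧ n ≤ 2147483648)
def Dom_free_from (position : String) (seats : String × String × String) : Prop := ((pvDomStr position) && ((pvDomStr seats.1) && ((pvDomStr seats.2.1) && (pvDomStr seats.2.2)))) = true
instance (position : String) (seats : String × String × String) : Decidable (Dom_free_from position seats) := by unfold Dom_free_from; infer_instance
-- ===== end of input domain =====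

-- ===== PORT A =====
-- A: index-and-counter while-loops over the 3-field tuple (fuel = tuple length bounds the loop).
def pvAFwd (L : List String) : Nat → Nat → Int → Int
  | 0, _, count => count
  | fuel+1, i, count =>
    if i < L.length ∧ PySem.List.pyGetD L (i : Int) "" = "." then
      pvAFwd L fuel (i+1) (count+1)
    else count

def pvABwd (L : List String) : Nat → Int → Int → Int
  | 0, _, count => count
  | fuel+1, i, count =>
    if i > -1 ∧ PySem.List.pyGetD L i "" = "." then
      pvABwd L fuel (i-1) (count+1)
    else count

def free_from (position : String) (seats : String × String × String) : Int :=
  let L := [seats.1, seats.2.1, seats.2.2]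
  let n := L.length
  if position == "window" then pvAFwd L n 0 0
  else pvABwd L n ((n : Int) - 1) 0

-- ===== PORT B =====
-- B: loop-free closed form f0*(1 + f1*(1 + f2)) over the seat flags from the chosen end.
def free_from_alt (position : String) (seats : String × String × String) : Int :=
  let a := seats.1
  let b := seats.2.1
  let c := seats.2.2
  let p := if position != "window" then (c, a) else (a, c)
  (if p.1 == "." then (1:Int) else 0) *
    (1 + (if b == "." then (1:Int) else 0) * (1 + (if p.2 == "." then (1:Int) else 0)))

-- ===== PRECONDITION & SPEC =====
def Spec_free_from (position : String) (seats : String × String × String) (out : Int) : Prop := out = free_from_alt position seats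
instance (position : String) (seats : String × String × String) (out : Int) : Decidable (Spec_free_from position seats out) := by unfold Spec_free_from; infer_instance

-- ===== CLAIM (what is proved, stated in full; the proofs are below) =====
def Claim_equal_free_from : Prop := ∀ (position : String) (seats : String × String × String), Dom_free_from position seats → Spec_free_from position seats (free_from position seats)

-- ===== LEMMAS AND PROOFS =====

-- ===== VERDICT (by name: the statement is the Claim_ definition above) =====
theorem pv_case (a b c : String) (position : String) :
    free_from position (a, b, c) = free_from_alt position (a, b, c) := by
  by_cases hp : position == "window" <;>
  by_cases h1 : a = "." <;>
  by_cases h2 : b = "." <;>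
  by_cases h3 : c = "." <;>
  simp only [beq_iff_eq] at hp ⊢ <;>
  simp [free_from, free_from_alt, pvAFwd, pvABwd, PySem.List.pyGetD, hp, h1, h2, h3]

-- ===== VERDICT =====
theorem free_from_spec : Claim_equal_free_from := by
  intro position seats _
  obtain ⟨a, b, c⟩ := seats
  exact pv_case a b c position
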